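-- pv_equiv track=rewrite | github.com/ColinDragon/MarineGuard | MarineGuard.py | explain_weakness
-- ===== SOURCE A (Python) =====
-- LOWER = "abcdefghjkmnpqrstuvwxyz"  # removed l and i
--
-- UPPER = "ABCDEFGHJKMNPQRSTUVWXYZ"  # removed I and O
--
-- DIGITS = "23456789"                # removed 0 and 1
--
-- SYMBOLS = "!@#$%^&*()-_=+[]{}|;:,.<>?/"
--
-- def has_repeated_chars(password):
--     """Detect if 3 or more identical characters appear consecutively."""
--     count = 1
--     last_char = ''
--     for c in password:
--         if c == last_char:
--             count += 1
--             if count >= 3: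
--                 return True
--         else:
--             count = 1
--             last_char = c
--     return False
--
-- def has_sequential_chars(password):
--     """
--     Detect 3+ sequential ascending or descending characters,
--     like abc, cba, 123, or 321.
--     """
--     if len(password) < 3:
--         return False
--     codes = [ord(c.lower()) for c in password]
--     for i in range(len(codes) - 2):
--         if codes[i] + 1 == codes[i + 1] and codes[i] + 2 == codes[i + 2]:
--             return True
--         if codes[i] - 1 == codes[i + 1] and codes[i] - 2 == codes[i + 2]:
--             return True
--     return False
--
-- def explain_weakness(password):
--     """
--     Generate a list of reasons why the password is considered weak.
--     """
--     reasons = []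
--     if len(password) < 8:
--         reasons.append("Too short (less than 8 characters)")
--     if not any(c in UPPER for c in password):
--         reasons.append("Missing uppercase letters")
--     if not any(c in LOWER for c in password):
--         reasons.append("Missing lowercase letters")
--     if not any(c in DIGITS for c in password):
--         reasons.append("Missing digits")
--     if not any(c in SYMBOLS for c in password):
--         reasons.append("Missing special characters")
--     if len(set(password)) < 5:
--         reasons.append("Low character variety")
--     if has_repeated_chars(password):
--         reasons.append("Contains repeated characters (3 or more in a row)")
--     if has_sequential_chars(password):
--         reasons.append("Contains sequential characters (e.g., abc, 123)")
--     return reasons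
-- ===== SOURCE B (Python) =====
-- LOWER = "abcdefghjkmnpqrstuvwxyz"  # removed l and i
--
-- UPPER = "ABCDEFGHJKMNPQRSTUVWXYZ"  # removed I and O
--
-- DIGITS = "23456789"                # removed 0 and 1
--
-- SYMBOLS = "!@#$%^&*()-_=+[]{}|;:,.<>?/"
--
-- def explain_weakness(password):
--     """One pass over the password collecting all weakness evidence, then emit reasons."""
--     has_upper = has_lower = has_digit = has_symbol = False
--     seen = set()
--     run = 1
--     last = None
--     repeated = False
--     p2 = p1 = None
--     sequential = False
--     for c in password:
--         if c in UPPER: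
--             has_upper = True
--         if c in LOWER:
--             has_lower = True
--         if c in DIGITS:
--             has_digit = True
--         if c in SYMBOLS:
--             has_symbol = True
--         seen.add(c)
--         if c == last:
--             run += 1
--             if run >= 3:
--                 repeated = True
--         else:
--             run = 1
--             last = c
--         code = ord(c.lower())
--         if p2 is not None and ((p2 + 1 == p1 and p2 + 2 == code)
--                                or (p2 - 1 == p1 and p2 - 2 == code)):
--             sequential = True
--         p2, p1 = p1, code
--     reasons = []
--     if len(password) < 8:
--         reasons.append("Too short (less than 8 characters)")
--     if not has_upper:
--         reasons.append("Missing uppercase letters")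
--     if not has_lower:
--         reasons.append("Missing lowercase letters")
--     if not has_digit:
--         reasons.append("Missing digits")
--     if not has_symbol:
--         reasons.append("Missing special characters")
--     if len(seen) < 5:
--         reasons.append("Low character variety")
--     if repeated:
--         reasons.append("Contains repeated characters (3 or more in a row)")
--     if sequential:
--         reasons.append("Contains sequential characters (e.g., abc, 123)")
--     return reasons
-- ===== Notes on version B (the rewrite author's own statement) =====
-- stated objective: alternative
-- what changed: Replaces A's seven separate passes (four any() scans, set(), and the two helper functions) by a single loop over the password that maintains presence flags, a seen-set, a run-length counter and the last two lowered character codes, then emits the reasons in the same fixed order.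
import Mathlib
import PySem

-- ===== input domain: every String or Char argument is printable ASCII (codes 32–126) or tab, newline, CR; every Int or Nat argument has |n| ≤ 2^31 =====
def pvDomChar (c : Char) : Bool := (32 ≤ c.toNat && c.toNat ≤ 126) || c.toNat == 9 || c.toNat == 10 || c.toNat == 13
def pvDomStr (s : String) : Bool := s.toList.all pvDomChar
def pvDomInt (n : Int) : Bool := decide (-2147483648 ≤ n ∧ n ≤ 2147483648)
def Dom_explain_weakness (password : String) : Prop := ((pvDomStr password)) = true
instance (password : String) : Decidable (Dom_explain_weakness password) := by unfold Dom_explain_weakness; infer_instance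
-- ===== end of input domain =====

-- B replaces A's five separate scans and two helper passes by one loop that
-- maintains flags, a seen-set, a run counter and the last two lowered codes (objective: alternative).

-- ===== PORT A =====
def pvLOWER : List Char := "abcdefghjkmnpqrstuvwxyz".toList
def pvUPPER : List Char := "ABCDEFGHJKMNPQRSTUVWXYZ".toList
def pvDIGITS : List Char := "23456789".toList
def pvSYMBOLS : List Char := "!@#$%^&*()-_=+[]{}|;:,.<>?/".toList

def pvCode (c : Char) : Int := ((PySem.Chars.lowerChar c).toNat : Int)

-- loop of has_repeated_chars: count, last_char ('' modelled as none)
def pvRepLoop : List Char → Int → Option Char → Bool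
  | [], _, _ => false
  | c :: rest, count, last =>
    if some c = last then
      if count + 1 ≥ 3 then true else pvRepLoop rest (count + 1) last
    else pvRepLoop rest 1 (some c)

def has_repeated_chars (password : String) : Bool :=
  pvRepLoop password.toList 1 none

-- index loop of has_sequential_chars, as the window scan over the codes list
def pvSeqScan : List Int → Bool
  | [] => false
  | [_] => false
  | [_, _] => false
  | a :: t@(b :: c :: _) =>
    if a + 1 = b ∧ a + 2 = c then true
    else if a - 1 = b ∧ a - 2 = c then true
    else pvSeqScan t

def has_sequential_chars (password : String) : Bool :=
  if password.toList.length < 3 then false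
  else pvSeqScan (password.toList.map pvCode)

def explain_weakness (password : String) : List String :=
  let reasons : List String := []
  let reasons := if password.toList.length < 8 then reasons ++ ["Too short (less than 8 characters)"] else reasons
  let reasons := if !(password.toList.any (fun c => pvUPPER.contains c)) then reasons ++ ["Missing uppercase letters"] else reasons
  let reasons := if !(password.toList.any (fun c => pvLOWER.contains c)) then reasons ++ ["Missing lowercase letters"] else reasons
  let reasons := if !(password.toList.any (fun c => pvDIGITS.contains c)) then reasons ++ ["Missing digits"] else reasons
  let reasons := if !(password.toList.any (fun c => pvSYMBOLS.contains c)) then reasons ++ ["Missing special characters"] else reasons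
  let reasons := if (PySem.Set.ofList password.toList).length < 5 then reasons ++ ["Low character variety"] else reasons
  let reasons := if has_repeated_chars password then reasons ++ ["Contains repeated characters (3 or more in a row)"] else reasons
  let reasons := if has_sequential_chars password then reasons ++ ["Contains sequential characters (e.g., abc, 123)"] else reasons
  reasons

-- ===== PORT B =====
structure PvSt where
  hasU : Bool
  hasL : Bool
  hasD : Bool
  hasS : Bool
  seen : PySem.Set Char
  run : Int
  last : Option Char
  rep : Bool
  p2 : Option Int
  p1 : Option Int
  seq : Bool
deriving Repr

def pvStep (st : PvSt) (c : Char) : PvSt :=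
  let code := pvCode c
  let hasU := st.hasU || pvUPPER.contains c
  let hasL := st.hasL || pvLOWER.contains c
  let hasD := st.hasD || pvDIGITS.contains c
  let hasS := st.hasS || pvSYMBOLS.contains c
  let seen := st.seen.add c
  let (run, last, rep) :=
    if some c = st.last then (st.run + 1, st.last, st.rep || decide (st.run + 1 ≥ 3))
    else ((1 : Int), some c, st.rep)
  let seq := st.seq ||
    (match st.p2, st.p1 with
     | some a, some b => decide ((a + 1 = b ∧ a + 2 = code) ∨ (a - 1 = b ∧ a - 2 = code))
     | _, _ => false)
  ⟨hasU, hasL, hasD, hasS, seen, run, last, rep, st.p1, some code, seq⟩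

def pvInit : PvSt := ⟨false, false, false, false, PySem.Set.empty, 1, none, false, none, none, false⟩

def explain_weakness_alt (password : String) : List String :=
  let st := password.toList.foldl pvStep pvInit
  let reasons : List String := []
  let reasons := if password.toList.length < 8 then reasons ++ ["Too short (less than 8 characters)"] else reasons
  let reasons := if !st.hasU then reasons ++ ["Missing uppercase letters"] else reasons
  let reasons := if !st.hasL then reasons ++ ["Missing lowercase letters"] else reasons
  let reasons := if !st.hasD then reasons ++ ["Missing digits"] else reasons
  let reasons := if !st.hasS then reasons ++ ["Missing special characters"] else reasons
  let reasons := if st.seen.length < 5 then reasons ++ ["Low character variety"] else reasons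
  let reasons := if st.rep then reasons ++ ["Contains repeated characters (3 or more in a row)"] else reasons
  let reasons := if st.seq then reasons ++ ["Contains sequential characters (e.g., abc, 123)"] else reasons
  reasons

-- ===== PRECONDITION & SPEC =====
def Spec_explain_weakness (password : String) (out : List String) : Prop := out = explain_weakness_alt password
instance (password : String) (out : List String) : Decidable (Spec_explain_weakness password out) := by unfold Spec_explain_weakness; infer_instance

-- ===== CLAIM (what is proved, stated in full; the proofs are below) =====
def Claim_equal_explain_weakness : Prop := ∀ (password : String), Dom_explain_weakness password → Spec_explain_weakness password (explain_weakness password)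

-- ===== LEMMAS AND PROOFS =====

theorem pv_fold_hasU (l : List Char) (st : PvSt) :
    (l.foldl pvStep st).hasU = (st.hasU || l.any (fun c => pvUPPER.contains c)) := by
  induction l generalizing st with
  | nil => simp
  | cons c rest ih => simp [ih, pvStep, Bool.or_assoc]

theorem pv_fold_hasL (l : List Char) (st : PvSt) :
    (l.foldl pvStep st).hasL = (st.hasL || l.any (fun c => pvLOWER.contains c)) := by
  induction l generalizing st with
  | nil => simp
  | cons c rest ih => simp [ih, pvStep, Bool.or_assoc]

theorem pv_fold_hasD (l : List Char) (st : PvSt) :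
    (l.foldl pvStep st).hasD = (st.hasD || l.any (fun c => pvDIGITS.contains c)) := by
  induction l generalizing st with
  | nil => simp
  | cons c rest ih => simp [ih, pvStep, Bool.or_assoc]

theorem pv_fold_hasS (l : List Char) (st : PvSt) :
    (l.foldl pvStep st).hasS = (st.hasS || l.any (fun c => pvSYMBOLS.contains c)) := by
  induction l generalizing st with
  | nil => simp
  | cons c rest ih => simp [ih, pvStep, Bool.or_assoc]

theorem pv_fold_seen (l : List Char) (st : PvSt) :
    (l.foldl pvStep st).seen = l.foldl PySem.Set.add st.seen := by
  induction l generalizing st with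
  | nil => rfl
  | cons c rest ih => simp [ih, pvStep]

theorem pv_fold_rep (l : List Char) (st : PvSt) :
    (l.foldl pvStep st).rep = (st.rep || pvRepLoop l st.run st.last) := by
  induction l generalizing st with
  | nil => simp [pvRepLoop]
  | cons c rest ih =>
    by_cases h : some c = st.last
    · by_cases h3 : st.run + 1 ≥ 3
      · simp only [List.foldl_cons, pvRepLoop, h, if_pos, h3]
        rw [ih]
        simp [pvStep, h, h3]
      · simp only [List.foldl_cons, pvRepLoop, h, if_pos, h3, if_false]
        rw [ih]
        simp [pvStep, h, h3]
    · simp only [List.foldl_cons, pvRepLoop, h, if_neg, not_false_iff]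
      rw [ih]
      simp [pvStep, h]

-- the per-step triple test of B, replayed as a recursion (proof helper only)
def pvSeqAux : Option Int → Option Int → List Char → Bool
  | _, _, [] => false
  | p2, p1, c :: rest =>
    ((match p2, p1 with
      | some a, some b => decide ((a + 1 = b ∧ a + 2 = pvCode c) ∨ (a - 1 = b ∧ a - 2 = pvCode c))
      | _, _ => false) : Bool) || pvSeqAux p1 (some (pvCode c)) rest

theorem pv_fold_seq (l : List Char) (st : PvSt) :
    (l.foldl pvStep st).seq = (st.seq || pvSeqAux st.p2 st.p1 l) := by
  induction l generalizing st with
  | nil => simp [pvSeqAux]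
  | cons c rest ih =>
    simp only [List.foldl_cons, pvSeqAux]
    rw [ih]
    simp [pvStep, Bool.or_assoc]

theorem pvSeqAux_some_some (l : List Char) (a b : Int) :
    pvSeqAux (some a) (some b) l = pvSeqScan (a :: b :: l.map pvCode) := by
  induction l generalizing a b with
  | nil => simp [pvSeqAux, pvSeqScan]
  | cons c rest ih =>
    simp only [pvSeqAux, List.map_cons, pvSeqScan, ih]
    by_cases h1 : a + 1 = b ∧ a + 2 = pvCode c
    · simp [h1]
    · by_cases h2 : a - 1 = b ∧ a - 2 = pvCode c
      · simp [h1, h2]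
      · simp [h1, h2]

theorem pvSeqAux_none_eq (l : List Char) :
    pvSeqAux none none l = pvSeqScan (l.map pvCode) := by
  cases l with
  | nil => simp [pvSeqAux, pvSeqScan]
  | cons c1 t =>
    cases t with
    | nil => simp [pvSeqAux, pvSeqScan]
    | cons c2 rest =>
      simp only [pvSeqAux, List.map_cons]
      rw [pvSeqAux_some_some]
      simp

theorem pv_seq_total (l : List Char) :
    pvSeqAux none none l = (if l.length < 3 then false else pvSeqScan (l.map pvCode)) := by
  rw [pvSeqAux_none_eq]
  rcases l with _ | ⟨a, _ | ⟨b, _ | ⟨c, rest⟩⟩⟩ <;> simp [pvSeqScan]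

-- ===== VERDICT (by name: the statement is the Claim_ definition above) =====
theorem explain_weakness_spec : Claim_equal_explain_weakness := by
  intro password _
  show explain_weakness password = explain_weakness_alt password
  simp only [explain_weakness, explain_weakness_alt, has_repeated_chars, has_sequential_chars,
    pv_fold_hasU, pv_fold_hasL, pv_fold_hasD, pv_fold_hasS, pv_fold_seen, pv_fold_rep,
    pv_fold_seq, pv_seq_total, PySem.Set.ofList_eq_foldl, pvInit, PySem.Set.empty, Bool.false_or]
  rfl
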